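-- pv_equiv track=rewrite | github.com/YuexinChen96/IO-Code | backend/TechLauncherDesign/Backend_Logic/LogicCalculation/dataResult_and_jsonFormat.py | get_color_feedin
-- ===== SOURCE A (Python) =====
-- def get_color_feedin(plan):
--     color = ['#C0F8E2' for i in range(24)]  # green
--     if plan == 1:
--         for i in range(24):
--             if 1 <= i <= 5:
--                 color[i] = '#C0F8E2'  # green
--             elif 10 <= i <= 14:
--                 color[i] = '#DCD2FF'  # purple
--             elif 17 <= i <= 20:
--                 color[i] = '#FFCFE5'  # red
--             else:
--                 color[i] = '#FFEC66'  # yellow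
--     elif plan == 2:
--         for i in range(24):
--             if 1 <= i <= 5:
--                 color[i] = '#C0F8E2'  # green
--             elif 10 <= i <= 14:
--                 color[i] = '#FFCFE5'  # red
--             else:
--                 color[i] = '#DCD2FF'  # purple
--     elif plan == 4:
--         for i in range(24):
--             if 7 <= i <= 16:
--                 color[i] = '#C0F8E2'  # green
--             elif 17 <= i <= 20:
--                 color[i] = '#FFCFE5'  # red
--             else:
--                 color[i] = '#DCD2FF'  # purple
--     elif plan == 5:
--         for i in range(24):
--             if 7 <= i <= 20:
--                 color[i] = '#C0F8E2'  # green
--             else: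
--                 color[i] = '#FFCFE5'  # red
--     return color
-- ===== SOURCE B (Python) =====
-- PLAN_TABLE = {
--     1: ('#FFEC66', [(1, 5, '#C0F8E2'), (10, 14, '#DCD2FF'), (17, 20, '#FFCFE5')]),
--     2: ('#DCD2FF', [(1, 5, '#C0F8E2'), (10, 14, '#FFCFE5')]),
--     4: ('#DCD2FF', [(7, 16, '#C0F8E2'), (17, 20, '#FFCFE5')]),
--     5: ('#FFCFE5', [(7, 20, '#C0F8E2')]),
-- }
--
--
-- def get_color_feedin(plan):
--     if plan not in PLAN_TABLE:
--         return ['#C0F8E2'] * 24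
--     default, ranges = PLAN_TABLE[plan]
--     color = [default] * 24
--     for lo, hi, c in ranges:
--         color[lo:hi + 1] = [c] * (hi - lo + 1)
--     return color
-- ===== Notes on version B (the rewrite author's own statement) =====
-- stated objective: simpler
-- what changed: Replaces the four per-plan if/elif loops over every hour slot by a table of (default_color, [(lo,hi,color)]) ranges per plan: fill with the default and overwrite each range via slice assignment; unknown plans fall through to the all-green list.
import Mathlib
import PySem

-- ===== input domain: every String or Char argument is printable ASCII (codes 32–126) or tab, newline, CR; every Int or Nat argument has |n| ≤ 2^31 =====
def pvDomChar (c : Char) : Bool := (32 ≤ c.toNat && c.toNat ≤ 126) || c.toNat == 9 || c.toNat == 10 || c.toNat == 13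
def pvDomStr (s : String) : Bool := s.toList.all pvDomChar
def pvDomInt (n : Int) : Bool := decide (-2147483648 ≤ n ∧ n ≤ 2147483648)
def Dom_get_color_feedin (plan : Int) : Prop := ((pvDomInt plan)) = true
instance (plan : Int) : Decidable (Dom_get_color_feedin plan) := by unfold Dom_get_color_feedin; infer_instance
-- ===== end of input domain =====

-- B replaces the per-plan 24-step if/elif loops by a table of (default, ranges) per plan (objective: simpler).

-- ===== PORT A =====
-- for-loop over range(24) assigning color[i]; i is always 0 ≤ i < 24, so List.set i.toNat is exact here
def get_color_feedin (plan : Int) : List String :=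
  let color := (PySem.List.pyRange 0 24 1).map (fun _ => "#C0F8E2")
  if plan == 1 then
    (PySem.List.pyRange 0 24 1).foldl (fun c i =>
      c.set i.toNat
        (if 1 ≤ i ∧ i ≤ 5 then "#C0F8E2"
         else if 10 ≤ i ∧ i ≤ 14 then "#DCD2FF"
         else if 17 ≤ i ∧ i ≤ 20 then "#FFCFE5"
         else "#FFEC66")) color
  else if plan == 2 then
    (PySem.List.pyRange 0 24 1).foldl (fun c i =>
      c.set i.toNat
        (if 1 ≤ i ∧ i ≤ 5 then "#C0F8E2"
         else if 10 ≤ i ∧ i ≤ 14 then "#FFCFE5"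
         else "#DCD2FF")) color
  else if plan == 4 then
    (PySem.List.pyRange 0 24 1).foldl (fun c i =>
      c.set i.toNat
        (if 7 ≤ i ∧ i ≤ 16 then "#C0F8E2"
         else if 17 ≤ i ∧ i ≤ 20 then "#FFCFE5"
         else "#DCD2FF")) color
  else if plan == 5 then
    (PySem.List.pyRange 0 24 1).foldl (fun c i =>
      c.set i.toNat
        (if 7 ≤ i ∧ i ≤ 20 then "#C0F8E2"
         else "#FFCFE5")) color
  else color

-- ===== PORT B =====
def pvPlanTable : List (Int × String × List (Int × Int × String)) :=
  [(1, ("#FFEC66", [(1, 5, "#C0F8E2"), (10, 14, "#DCD2FF"), (17, 20, "#FFCFE5")])),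
   (2, ("#DCD2FF", [(1, 5, "#C0F8E2"), (10, 14, "#FFCFE5")])),
   (4, ("#DCD2FF", [(7, 16, "#C0F8E2"), (17, 20, "#FFCFE5")])),
   (5, ("#FFCFE5", [(7, 20, "#C0F8E2")]))]

-- slice assignment color[lo:hi+1] = [c]*(hi-lo+1); exact since the table only holds 0 ≤ lo ≤ hi < 24
def pvFillRange (color : List String) (lo hi : Int) (c : String) : List String :=
  color.take lo.toNat ++ List.replicate (hi - lo + 1).toNat c ++ color.drop (hi + 1).toNat

def get_color_feedin_alt (plan : Int) : List String :=
  match (pvPlanTable.find? (fun p => p.1 == plan)).map (·.2) with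
  | none => List.replicate 24 "#C0F8E2"
  | some (dflt, ranges) =>
      ranges.foldl (fun color r => pvFillRange color r.1 r.2.1 r.2.2) (List.replicate 24 dflt)

-- ===== PRECONDITION & SPEC =====
def Spec_get_color_feedin (plan : Int) (out : List String) : Prop := out = get_color_feedin_alt plan
instance (plan : Int) (out : List String) : Decidable (Spec_get_color_feedin plan out) := by unfold Spec_get_color_feedin; infer_instance

-- ===== CLAIM (what is proved, stated in full; the proofs are below) =====
def Claim_equal_get_color_feedin : Prop := ∀ (plan : Int), Dom_get_color_feedin plan → Spec_get_color_feedin plan (get_color_feedin plan)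

-- ===== LEMMAS AND PROOFS =====
theorem pv_other (plan : Int) (h1 : plan ≠ 1) (h2 : plan ≠ 2) (h4 : plan ≠ 4) (h5 : plan ≠ 5) :
    get_color_feedin plan = get_color_feedin_alt plan := by
  have e1 : ((1 : Int) == plan) = false := by simp [Ne.symm h1]
  have e2 : ((2 : Int) == plan) = false := by simp [Ne.symm h2]
  have e4 : ((4 : Int) == plan) = false := by simp [Ne.symm h4]
  have e5 : ((5 : Int) == plan) = false := by simp [Ne.symm h5]
  simp [get_color_feedin, get_color_feedin_alt, pvPlanTable,
    List.find?, h1, h2, h4, h5, e1, e2, e4, e5]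

-- ===== VERDICT (by name: the statement is the Claim_ definition above) =====
theorem get_color_feedin_spec : Claim_equal_get_color_feedin := by
  intro plan _
  unfold Spec_get_color_feedin
  by_cases h1 : plan = 1
  · subst h1; decide
  by_cases h2 : plan = 2
  · subst h2; decide
  by_cases h4 : plan = 4
  · subst h4; decide
  by_cases h5 : plan = 5
  · subst h5; decide
  exact pv_other plan h1 h2 h4 h5
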